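-- pv_equiv track=rewrite | github.com/Rusgalll/lesson01 | 05 lesson (1).py | reverse_half
-- ===== SOURCE A (Python) =====
-- def reverse_half(n):
--     if n % 2 != 0:
--         return 'Допускается только четное n'
--     numbers_list = list(range(1, n + 1))
--     result = []
--     j = 0
--     for i in range(len(numbers_list) - 1, -1, -1):
--         if i >= len(numbers_list) / 2:
--             result.append(numbers_list[i])
--         else:
--             result.append(numbers_list[j])
--             j += 1
--
--     return result
-- ===== SOURCE B (Python) =====
-- def reverse_half(n):
--     if n % 2 != 0:
--         return 'Допускается только четное n'
--     # descending top half, then ascending bottom half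
--     return list(range(n, n // 2, -1)) + list(range(1, n // 2 + 1))
-- ===== Notes on version B (the rewrite author's own statement) =====
-- stated objective: simpler
-- what changed: Replaces the list build plus backward index loop with a per-element midpoint branch and a j counter by a direct concatenation of two C-level ranges (descending top half ++ ascending bottom half).
-- outside the precondition, e.g. on reverse_half(3): A returns 'Допускается только четное n', B returns 'Допускается только четное n'
import Mathlib
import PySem

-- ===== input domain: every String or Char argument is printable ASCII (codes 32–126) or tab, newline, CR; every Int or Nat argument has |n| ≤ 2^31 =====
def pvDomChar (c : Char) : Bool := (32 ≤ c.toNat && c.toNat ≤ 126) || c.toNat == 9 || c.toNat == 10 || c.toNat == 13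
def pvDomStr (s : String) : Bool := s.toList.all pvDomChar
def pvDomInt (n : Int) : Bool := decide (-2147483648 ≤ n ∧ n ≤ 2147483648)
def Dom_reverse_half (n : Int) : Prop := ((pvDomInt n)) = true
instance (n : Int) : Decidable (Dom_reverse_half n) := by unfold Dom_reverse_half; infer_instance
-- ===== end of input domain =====

-- B replaces the backward index loop with a midpoint branch by a plain concatenation of two ranges.
-- On odd n the Python A returns a string (not a list of ints); Pre_ excludes exactly those inputs.

-- ===== PORT A =====
-- 'i >= len(numbers_list) / 2' compares ints via float division; it is exact here and
-- ported as '2*i ≥ len' (equivalent for integers of this magnitude, no rounding occurs).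
def reverse_half (n : Int) : List Int :=
  let numbers : List Int := PySem.List.pyRange 1 (n + 1) 1
  let L : Int := (numbers.length : Int)
  let st := (PySem.List.pyRange (L - 1) (-1) (-1)).foldl
    (fun (st : List Int × Int) i =>
      if 2 * i ≥ L then (st.1 ++ [PySem.List.pyGetD numbers i 0], st.2)
      else (st.1 ++ [PySem.List.pyGetD numbers st.2 0], st.2 + 1))
    ([], 0)
  st.1

-- ===== PORT B =====
def reverse_half_alt (n : Int) : List Int :=
  PySem.List.pyRange n (PySem.Int.floordiv n 2) (-1)
    ++ PySem.List.pyRange 1 (PySem.Int.floordiv n 2 + 1) 1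

-- ===== PRECONDITION & SPEC =====
-- On odd n the Python A returns a str, not a list of ints: excluded.
def Pre_reverse_half (n : Int) : Prop := PySem.Int.mod n 2 = 0
instance (n : Int) : Decidable (Pre_reverse_half n) := by unfold Pre_reverse_half; infer_instance
def pvWitness_reverse_half : Int := (6)

def Spec_reverse_half (n : Int) (out : List Int) : Prop := out = reverse_half_alt n
instance (n : Int) (out : List Int) : Decidable (Spec_reverse_half n out) := by unfold Spec_reverse_half; infer_instance

-- ===== CLAIM (what is proved, stated in full; the proofs are below) =====
def Claim_equal_reverse_half : Prop := ∀ (n : Int), Dom_reverse_half n → Pre_reverse_half n → Spec_reverse_half n (reverse_half n)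

-- ===== LEMMAS AND PROOFS =====

-- phase 1: while every index satisfies the midpoint test, A appends numbers[i] and j is unchanged
theorem pv_phase1 (numbers : List Int) (L : Int) (l : List Int) (acc : List Int) (j : Int)
    (h : ∀ i ∈ l, 2 * i ≥ L) :
    l.foldl
      (fun (st : List Int × Int) i =>
        if 2 * i ≥ L then (st.1 ++ [PySem.List.pyGetD numbers i 0], st.2)
        else (st.1 ++ [PySem.List.pyGetD numbers st.2 0], st.2 + 1))
      (acc, j)
    = (acc ++ l.map (fun i => PySem.List.pyGetD numbers i 0), j) := by
  induction l generalizing acc with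
  | nil => simp
  | cons a t ih =>
    have ha : 2 * a ≥ L := h a (by simp)
    simp only [List.foldl_cons, if_pos ha, List.map_cons]
    rw [ih _ (fun i hi => h i (List.mem_cons_of_mem _ hi))]
    simp

-- phase 2: once every index fails the test, A appends numbers[j], numbers[j+1], …
theorem pv_phase2 (numbers : List Int) (L : Int) (l : List Int) (acc : List Int) (j : Int)
    (h : ∀ i ∈ l, ¬ (2 * i ≥ L)) :
    l.foldl
      (fun (st : List Int × Int) i =>
        if 2 * i ≥ L then (st.1 ++ [PySem.List.pyGetD numbers i 0], st.2)
        else (st.1 ++ [PySem.List.pyGetD numbers st.2 0], st.2 + 1))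
      (acc, j)
    = (acc ++ (PySem.List.pyRange j (j + l.length) 1).map (fun t => PySem.List.pyGetD numbers t 0),
       j + l.length) := by
  induction l generalizing acc j with
  | nil => simp [PySem.List.pyRange_one_eq_nil]
  | cons a t ih =>
    have ha := h a (by simp)
    simp only [List.foldl_cons, if_neg ha]
    rw [ih _ _ (fun i hi => h i (List.mem_cons_of_mem _ hi))]
    have hlen : ((a :: t).length : Int) = (t.length : Int) + 1 := by simp
    have hr : PySem.List.pyRange j (j + ((a :: t).length : Int)) 1
        = j :: PySem.List.pyRange (j + 1) (j + ((a :: t).length : Int)) 1 :=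
      PySem.List.pyRange_one_cons (by omega)
    rw [hr]
    have h2 : j + ((a :: t).length : Int) = j + 1 + (t.length : Int) := by omega
    rw [h2]
    simp [List.append_assoc]

-- pyGetD on [1..n] is just 1 + i
theorem pv_map_succ_pyRange (a b : Int) :
    (PySem.List.pyRange a b 1).map (fun i => 1 + i) = PySem.List.pyRange (a + 1) (b + 1) 1 := by
  rw [PySem.List.pyRange_one a b, PySem.List.pyRange_one (a + 1) (b + 1)]
  have hd : (b + 1 - (a + 1)).toNat = (b - a).toNat := by omega
  rw [hd, List.map_map]
  apply List.map_congr_left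
  intro t _
  simp; omega

theorem pv_getD_numbers (n i : Int) (h0 : 0 ≤ i) (h1 : i < n) :
    PySem.List.pyGetD (PySem.List.pyRange 1 (n + 1) 1) i 0 = 1 + i := by
  have h := pv_map_succ_pyRange 0 n
  norm_num at h
  rw [← h]
  rw [PySem.List.pyGetD_map_pyRange_of_nonneg _ _ _ _ h0 h1]

theorem reverse_half_spec : Claim_equal_reverse_half := by
  intro n _ hpre
  unfold Spec_reverse_half reverse_half reverse_half_alt
  dsimp only []
  have hk := PySem.Int.floordiv_mul_add_mod n 2
  rw [hpre] at hk
  set k := PySem.Int.floordiv n 2 with hkdef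
  simp only [add_zero] at hk
  by_cases hn : n ≤ 0
  · -- empty case: every range involved is empty
    rw [PySem.List.pyRange_one_eq_nil (by omega : n + 1 ≤ 1)]
    simp only [List.length_nil, Nat.cast_zero]
    rw [PySem.List.pyRange_neg_one_eq_nil (by omega : (0:Int) - 1 ≤ -1)]
    rw [PySem.List.pyRange_neg_one_eq_nil (by omega : n ≤ k)]
    rw [PySem.List.pyRange_one_eq_nil (by omega : k + 1 ≤ 1)]
    simp
  · have hn2 : 2 ≤ n := by omega
    have hL : ((PySem.List.pyRange 1 (n + 1) 1).length : Int) = n := by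
      rw [PySem.List.length_pyRange_one]; omega
    rw [hL]
    -- split the countdown range at the midpoint
    have hsplit : PySem.List.pyRange (n - 1) (-1) (-1)
        = (PySem.List.pyRange k n 1).reverse ++ (PySem.List.pyRange 0 k 1).reverse := by
      rw [PySem.List.pyRange_neg_one_eq_reverse]
      have : PySem.List.pyRange (-1 + 1) (n - 1 + 1) 1
          = PySem.List.pyRange 0 k 1 ++ PySem.List.pyRange k n 1 := by
        have h01 : (-1 : Int) + 1 = 0 := by omega
        have h02 : n - 1 + 1 = n := by omega
        rw [h01, h02]
        exact PySem.List.pyRange_one_append 0 k n (by omega) (by omega)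
      rw [this, List.reverse_append]
    rw [hsplit, List.foldl_append]
    rw [pv_phase1 _ n _ [] 0 (by
      intro i hi
      rw [List.mem_reverse, PySem.List.mem_pyRange_one] at hi
      omega)]
    rw [pv_phase2 _ n _ _ 0 (by
      intro i hi
      rw [List.mem_reverse, PySem.List.mem_pyRange_one] at hi
      omega)]
    simp only [List.nil_append, List.length_reverse, PySem.List.length_pyRange_one]
    have hlen : (0 : Int) + ((k - 0).toNat : Int) = k := by omega
    rw [hlen]
    -- first half: map (pyGetD [1..n]) over the reversed [k..n) is the countdown [n..k)
    have hmap1 : ((PySem.List.pyRange k n 1).reverse).map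
        (fun i => PySem.List.pyGetD (PySem.List.pyRange 1 (n + 1) 1) i 0)
        = PySem.List.pyRange n k (-1) := by
      rw [List.map_reverse]
      rw [List.map_congr_left (l := PySem.List.pyRange k n 1)
        (g := fun i => 1 + i) (by
          intro i hi
          rw [PySem.List.mem_pyRange_one] at hi
          exact pv_getD_numbers n i (by omega) (by omega))]
      rw [pv_map_succ_pyRange, PySem.List.pyRange_neg_one_eq_reverse]
    -- second half: map over [0..k) is the ascending [1..k+1)
    have hmap2 : (PySem.List.pyRange 0 k 1).map
        (fun i => PySem.List.pyGetD (PySem.List.pyRange 1 (n + 1) 1) i 0)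
        = PySem.List.pyRange 1 (k + 1) 1 := by
      rw [List.map_congr_left (l := PySem.List.pyRange 0 k 1)
        (g := fun i => 1 + i) (by
          intro i hi
          rw [PySem.List.mem_pyRange_one] at hi
          exact pv_getD_numbers n i (by omega) (by omega))]
      rw [pv_map_succ_pyRange]
      norm_num
    rw [hmap1, hmap2]
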